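-- pv_equiv track=rewrite | github.com/DC1823/P3TC | MTuring.py | revisarxy
-- ===== SOURCE A (Python) =====
-- def revisarxy(cadena_entrada):
--     xv = False
--     yv = False
--     for char in cadena_entrada:
--         if char == 'Y':
--             yv = True
--         elif char == 'X' and yv:
--             return False
--         elif char == 'X':
--             xv = True
--         else:
--             return False
--     cx = cadena_entrada.count('X')
--     cy = cadena_entrada.count('Y')
--     return cx == cy and xv and yv
-- ===== SOURCE B (Python) =====
-- def revisarxy(cadena_entrada):
--     n = len(cadena_entrada)
--     if n == 0 or n % 2 == 1:
--         return False
--     h = n // 2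
--     return cadena_entrada == 'X' * h + 'Y' * h
-- ===== Notes on version B (the rewrite author's own statement) =====
-- stated objective: simpler
-- what changed: Replaces the stateful character loop plus two .count() passes with a single closed-form comparison against the canonical 'X'*h + 'Y'*h string (after rejecting empty/odd lengths).
import Mathlib
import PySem

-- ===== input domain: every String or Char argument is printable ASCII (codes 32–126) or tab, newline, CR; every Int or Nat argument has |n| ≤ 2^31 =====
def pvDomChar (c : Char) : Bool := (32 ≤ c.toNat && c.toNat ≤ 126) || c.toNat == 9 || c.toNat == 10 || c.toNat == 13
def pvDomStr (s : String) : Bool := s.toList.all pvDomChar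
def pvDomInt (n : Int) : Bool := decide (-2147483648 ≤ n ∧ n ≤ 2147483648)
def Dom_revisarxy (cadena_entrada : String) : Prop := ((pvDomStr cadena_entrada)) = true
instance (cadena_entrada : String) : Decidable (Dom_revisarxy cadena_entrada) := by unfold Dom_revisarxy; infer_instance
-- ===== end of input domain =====

-- B replaces A's stateful scan + two .count() passes by one closed-form comparison
-- against the canonical 'X'*h + 'Y'*h string (objective: simpler).

-- ===== PORT A =====
-- the for-loop with early returns: state (xv, yv); `none` = an early `return False`
def revisarxyLoop : List Char → Bool → Bool → Option (Bool × Bool)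
  | [], xv, yv => some (xv, yv)
  | c :: rest, xv, yv =>
    if c == 'Y' then revisarxyLoop rest xv true
    else if c == 'X' && yv then none
    else if c == 'X' then revisarxyLoop rest true yv
    else none

def revisarxy (cadena_entrada : String) : Bool :=
  match revisarxyLoop cadena_entrada.toList false false with
  | none => false
  | some (xv, yv) =>
    let cx := PySem.Str.count cadena_entrada "X"
    let cy := PySem.Str.count cadena_entrada "Y"
    (cx == cy) && xv && yv

-- ===== PORT B =====
-- the string comparison `cadena_entrada == 'X'*h + 'Y'*h` is done on code points (exact)
def revisarxy_alt (cadena_entrada : String) : Bool :=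
  let n : Int := PySem.Str.len cadena_entrada
  if n == 0 || PySem.Int.mod n 2 == 1 then false
  else
    let h : Nat := (PySem.Int.floordiv n 2).toNat
    cadena_entrada.toList == List.replicate h 'X' ++ List.replicate h 'Y'

-- ===== PRECONDITION & SPEC =====
def Spec_revisarxy (cadena_entrada : String) (out : Bool) : Prop := out = revisarxy_alt cadena_entrada
instance (cadena_entrada : String) (out : Bool) : Decidable (Spec_revisarxy cadena_entrada out) := by unfold Spec_revisarxy; infer_instance

-- ===== CLAIM (what is proved, stated in full; the proofs are below) =====
def Claim_equal_revisarxy : Prop := ∀ (cadena_entrada : String), Dom_revisarxy cadena_entrada → Spec_revisarxy cadena_entrada (revisarxy cadena_entrada)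

-- ===== LEMMAS AND PROOFS =====

-- str.count with a single-character needle is List.count
theorem countgo_single (c : Char) : ∀ (l : List Char) (fuel acc : Nat), l.length ≤ fuel →
    PySem.Chars.count.go [c] fuel l acc = acc + l.count c
  | [], fuel, acc, _ => by cases fuel <;> simp [PySem.Chars.count.go]
  | h :: t, fuel + 1, acc, hle => by
    rw [PySem.Chars.count.go]
    have hp : [c].isPrefixOf (h :: t) = (c == h) := by simp [List.isPrefixOf]
    rw [hp]
    by_cases hc : c = h
    · rw [if_pos (by simp [hc])]
      simp only [List.length_singleton, List.drop_one, List.tail_cons]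
      rw [countgo_single c t fuel (acc+1) (by simpa using hle)]
      simp [hc]; omega
    · rw [if_neg (by simp [hc])]
      rw [countgo_single c t fuel acc (by simpa using hle)]
      simp [List.count_cons]
      exact fun e => hc e.symm

theorem count_single (cs : List Char) (c : Char) : PySem.Chars.count cs [c] = cs.count c := by
  simp [PySem.Chars.count, countgo_single c cs cs.length 0 le_rfl]

-- once yv is set, the loop survives iff only 'Y's remain
theorem loopY (L : List Char) : ∀ xv, revisarxyLoop L xv true =
    if L.all (· == 'Y') then some (xv, true) else none := by
  induction L with
  | nil => intro xv; simp [revisarxyLoop]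
  | cons c t ih =>
    intro xv
    by_cases hc : c = 'Y'
    · simp [revisarxyLoop, hc, ih]
    · simp [revisarxyLoop, hc]
      intro h1 h2; exact absurd h2 h1

-- before any 'Y': the loop survives iff L = X-block ++ Y-block
theorem loopX (L : List Char) : ∀ xv, revisarxyLoop L xv false =
    if (L.dropWhile (· == 'X')).all (· == 'Y')
    then some (xv || !(L.takeWhile (· == 'X')).isEmpty, !(L.dropWhile (· == 'X')).isEmpty)
    else none := by
  induction L with
  | nil => intro xv; simp [revisarxyLoop]
  | cons c t ih =>
    intro xv
    by_cases hy : c = 'Y'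
    · subst hy
      simp [revisarxyLoop, loopY]
    · by_cases hx : c = 'X'
      · subst hx
        simp [revisarxyLoop, ih]
      · simp [revisarxyLoop, hy, hx]

-- takeWhile/dropWhile of the canonical string
theorem canon (h k : Nat) (hk : 1 ≤ k) :
    (List.replicate h 'X' ++ List.replicate k 'Y').takeWhile (· == 'X') = List.replicate h 'X' ∧
    (List.replicate h 'X' ++ List.replicate k 'Y').dropWhile (· == 'X') = List.replicate k 'Y' := by
  induction h with
  | zero =>
    obtain ⟨k', rfl⟩ : ∃ k', k = k' + 1 := ⟨k - 1, by omega⟩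
    simp [List.replicate_succ]
  | succ n ih =>
    simp [List.replicate_succ, ih]

theorem A_true_iff (s : String) : revisarxy s = true ↔
    ∃ h : Nat, 1 ≤ h ∧ s.toList = List.replicate h 'X' ++ List.replicate h 'Y' := by
  unfold revisarxy
  rw [loopX s.toList false]
  set a := s.toList.takeWhile (· == 'X') with hadef
  set r := s.toList.dropWhile (· == 'X') with hrdef
  have hsplit : s.toList = a ++ r := by
    rw [hadef, hrdef, List.takeWhile_append_dropWhile]
  by_cases hall : r.all (· == 'Y')
  · rw [if_pos hall]
    have ha : ∀ c ∈ a, c = 'X' := by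
      intro c hc; rw [hadef] at hc; simpa using List.mem_takeWhile_imp hc
    have hr : ∀ c ∈ r, c = 'Y' := by
      intro c hc; simpa using List.all_eq_true.mp hall c hc
    have hcx : PySem.Str.count s "X" = a.length := by
      rw [show PySem.Str.count s "X" = PySem.Chars.count s.toList ['X'] from by simp,
        count_single, hsplit, List.count_append,
        List.count_eq_length.mpr (fun b hb => (ha b hb).symm),
        List.count_eq_zero.mpr (fun hmem => by have := hr _ hmem; simp at this)]
      omega
    have hcy : PySem.Str.count s "Y" = r.length := by
      rw [show PySem.Str.count s "Y" = PySem.Chars.count s.toList ['Y'] from by simp,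
        count_single, hsplit, List.count_append,
        List.count_eq_zero.mpr (fun hmem => by have := ha _ hmem; simp at this),
        List.count_eq_length.mpr (fun b hb => (hr b hb).symm)]
      omega
    simp only [hcx, hcy, Bool.and_eq_true, beq_iff_eq, Bool.false_or, Bool.not_eq_eq_eq_not,
      Bool.not_true, List.isEmpty_eq_false_iff]
    constructor
    · rintro ⟨⟨hlen, hane⟩, hrne⟩
      refine ⟨a.length, ?_, ?_⟩
      · have : a ≠ [] := by simpa using hane
        have := List.length_pos_of_ne_nil this
        omega
      · rw [hsplit]
        have h1 : a = List.replicate a.length 'X' := List.eq_replicate_of_mem ha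
        have h2 : r = List.replicate r.length 'Y' := List.eq_replicate_of_mem hr
        rw [← hlen] at h2
        rw [← h1, ← h2]
    · rintro ⟨h, hh, heq⟩
      have ha2 : a = List.replicate h 'X' := by rw [hadef, heq]; exact (canon h h hh).1
      have hr2 : r = List.replicate h 'Y' := by rw [hrdef, heq]; exact (canon h h hh).2
      refine ⟨⟨by rw [ha2, hr2]; simp, ?_⟩, ?_⟩
      · rw [ha2]; simp [List.replicate_eq_nil_iff]; omega
      · rw [hr2]; simp [List.replicate_eq_nil_iff]; omega
  · rw [if_neg hall]
    simp only [Bool.false_eq_true, false_iff]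
    rintro ⟨h, hh, heq⟩
    have hr2 : r = List.replicate h 'Y' := by rw [hrdef, heq]; exact (canon h h hh).2
    rw [hr2] at hall
    simp at hall

theorem B_true_iff (s : String) : revisarxy_alt s = true ↔
    ∃ h : Nat, 1 ≤ h ∧ s.toList = List.replicate h 'X' ++ List.replicate h 'Y' := by
  unfold revisarxy_alt
  have hn : PySem.Str.len s = (s.toList.length : Int) := by simp
  have hmodn : PySem.Int.mod (s.toList.length : Int) 2 = ((s.toList.length % 2 : Nat) : Int) := by
    simp [PySem.Int.mod, Int.fmod_eq_emod]
  have hfd : PySem.Int.floordiv (s.toList.length : Int) 2 = ((s.toList.length / 2 : Nat) : Int) := by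
    simp [PySem.Int.floordiv, Int.fdiv_eq_ediv]
  rw [hn]
  by_cases hguard : (s.toList.length : Int) == 0 || PySem.Int.mod (s.toList.length : Int) 2 == 1
  · rw [if_pos hguard]
    simp only [Bool.false_eq_true, false_iff]
    rintro ⟨h, hh, heq⟩
    have hlen : s.toList.length = 2 * h := by rw [heq]; simp; omega
    rw [hmodn] at hguard
    simp only [Bool.or_eq_true, beq_iff_eq] at hguard
    omega
  · rw [if_neg hguard]
    rw [hmodn] at hguard
    simp only [Bool.or_eq_true, beq_iff_eq, not_or] at hguard
    obtain ⟨h0, hmod⟩ := hguard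
    rw [hfd]
    simp only [beq_iff_eq, Int.toNat_natCast]
    constructor
    · intro heq
      refine ⟨s.toList.length / 2, by omega, heq⟩
    · rintro ⟨h, hh, heq⟩
      have hlen : s.toList.length = 2 * h := by rw [heq]; simp; omega
      rw [hlen, heq]
      congr 2 <;> omega

-- ===== VERDICT (by name: the statement is the Claim_ definition above) =====
theorem revisarxy_spec : Claim_equal_revisarxy := by
  intro s _
  unfold Spec_revisarxy
  rcases Bool.eq_false_or_eq_true (revisarxy s) with ha | ha
  · rw [ha, ((B_true_iff s).mpr ((A_true_iff s).mp ha)).symm]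
  · rcases Bool.eq_false_or_eq_true (revisarxy_alt s) with hb | hb
    · rw [(A_true_iff s).mpr ((B_true_iff s).mp hb), hb]
    · rw [ha, hb]
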